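-- pv_equiv track=rewrite | github.com/MarkShinozaki/CPTS315 | HW1/HW1 - Work/HW-1.py | Apiori2
-- ===== SOURCE A (Python) =====
-- import itertools as it
--
-- def Apiori2(data, p1data, support):
--     counter = {}
--     finalCounter = {}
--     combos = list(it.combinations(p1data.keys(), 2))
--
--     for key in combos:
--         counter[key] = 0
--
--
--     for row in data:
--         rcombo = list(it.combinations(row, 2))
--         for key in rcombo:
--             if (key in counter.keys()):
--                 counter[key] += 1
--             elif (key[::-1] in counter.keys()):
--                 counter[key[::-1]] += 1
--
--
--
--     for key, value in counter.items():
--         if value >= support: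
--             finalCounter[key] = value
--
--
--     return finalCounter
-- ===== SOURCE B (Python) =====
-- import itertools as it
--
-- def Apiori2(data, p1data, support):
--     # One unconditional tally pass over the data (no candidate-membership test
--     # inside the loop), then a separate pass over the candidate pairs that
--     # combines both orientations of each pair and filters by support.
--     tally = {}
--     for row in data:
--         for key in it.combinations(row, 2):
--             tally[key] = tally.get(key, 0) + 1
--     final = {}
--     for pair in it.combinations(p1data.keys(), 2):
--         total = tally.get(pair, 0) + tally.get(pair[::-1], 0)
--         if total >= support:
--             final[pair] = total
--     return final
-- ===== Notes on version B (the rewrite author's own statement) =====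
-- stated objective: faster
-- what changed: B replaces A's candidate-gated counting loop (membership test plus reversed-key elif executed for every row pair) by an unconditional one-pass pair tally, followed by a separate pass over the candidate combinations that sums the two orientations of each pair and filters by support.
import Mathlib
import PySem

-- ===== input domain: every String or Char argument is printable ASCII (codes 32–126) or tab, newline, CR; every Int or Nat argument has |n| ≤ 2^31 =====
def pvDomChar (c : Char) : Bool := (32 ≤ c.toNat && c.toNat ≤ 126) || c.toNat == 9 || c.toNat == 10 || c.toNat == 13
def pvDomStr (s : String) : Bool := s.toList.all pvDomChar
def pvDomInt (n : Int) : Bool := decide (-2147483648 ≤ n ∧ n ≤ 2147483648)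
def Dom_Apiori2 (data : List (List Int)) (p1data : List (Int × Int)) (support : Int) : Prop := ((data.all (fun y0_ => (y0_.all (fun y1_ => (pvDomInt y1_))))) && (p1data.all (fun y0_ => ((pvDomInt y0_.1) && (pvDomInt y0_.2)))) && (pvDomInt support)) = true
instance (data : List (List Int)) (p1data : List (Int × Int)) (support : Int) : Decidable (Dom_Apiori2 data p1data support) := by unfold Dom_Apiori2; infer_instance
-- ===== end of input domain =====

set_option maxRecDepth 8192


-- B replaces A's candidate-gated counting loop by an unconditional pair tally plus a separate
-- orientation-summing filter pass over the candidate pairs; the returned value is proved equal.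

-- itertools.combinations(l, 2), in Python's iteration order (shared helper of both ports)
def combos2 {α : Type} : List α → List (α × α)
  | [] => []
  | x :: xs => xs.map (fun y => (x, y)) ++ combos2 xs

-- ===== PORT A =====
-- body of A's inner counting loop (key[::-1] on a 2-tuple is the swapped pair)
def aStep (c : PySem.Dict (Int × Int) Int) (key : Int × Int) : PySem.Dict (Int × Int) Int :=
  if c.contains key then c.insert key (c.getD key 0 + 1)
  else if c.contains (key.2, key.1) then c.insert (key.2, key.1) (c.getD (key.2, key.1) 0 + 1)
  else c

def Apiori2 (data : List (List Int)) (p1data : List (Int × Int)) (support : Int) : List (Int × Int × Int) :=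
  let combos := combos2 (PySem.Dict.keys (PySem.Dict.ofList p1data))
  let counter0 := combos.foldl (fun d k => d.insert k (0 : Int)) PySem.Dict.empty
  let counter := data.foldl (fun c row => (combos2 row).foldl aStep c) counter0
  -- finalCounter is a dict whose keys are inserted fresh in items order, hence its item list:
  counter.items.foldl (fun acc p => if p.2 ≥ support then acc ++ [(p.1.1, p.1.2, p.2)] else acc) []

-- ===== PORT B =====
-- body of B's tally loop: tally[key] = tally.get(key, 0) + 1
def bStep (t : PySem.Dict (Int × Int) Int) (k : Int × Int) : PySem.Dict (Int × Int) Int :=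
  t.insert k (t.getD k 0 + 1)

def Apiori2_alt (data : List (List Int)) (p1data : List (Int × Int)) (support : Int) : List (Int × Int × Int) :=
  let tally := data.foldl (fun t row => (combos2 row).foldl bStep t) PySem.Dict.empty
  (combos2 (PySem.Dict.keys (PySem.Dict.ofList p1data))).foldl
    (fun acc q =>
      let total := tally.getD q 0 + tally.getD (q.2, q.1) 0
      if total ≥ support then acc ++ [(q.1, q.2, total)] else acc) []

-- ===== PRECONDITION & SPEC =====
def Spec_Apiori2 (data : List (List Int)) (p1data : List (Int × Int)) (support : Int) (out : List (Int × Int × Int)) : Prop := out = Apiori2_alt data p1data support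
instance (data : List (List Int)) (p1data : List (Int × Int)) (support : Int) (out : List (Int × Int × Int)) : Decidable (Spec_Apiori2 data p1data support out) := by unfold Spec_Apiori2; infer_instance

-- ===== CLAIM (what is proved, stated in full; the proofs are below) =====
def Claim_equal_Apiori2 : Prop := ∀ (data : List (List Int)) (p1data : List (Int × Int)) (support : Int), Dom_Apiori2 data p1data support → Spec_Apiori2 data p1data support (Apiori2 data p1data support)

-- ===== LEMMAS AND PROOFS =====

theorem mem_combos2 {α : Type} {q : α × α} : ∀ {l : List α}, q ∈ combos2 l → q.1 ∈ l ∧ q.2 ∈ l := by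
  intro l
  induction l with
  | nil => simp [combos2]
  | cons x xs ih =>
    intro h
    simp only [combos2, List.mem_append, List.mem_map] at h
    rcases h with ⟨y, hy, hq⟩ | h
    · subst hq; exact ⟨by simp, by simp [hy]⟩
    · rcases ih h with ⟨h1, h2⟩; exact ⟨by simp [h1], by simp [h2]⟩

theorem nodup_combos2 {α : Type} [DecidableEq α] : ∀ {l : List α}, l.Nodup → (combos2 l).Nodup := by
  intro l
  induction l with
  | nil => simp [combos2]
  | cons x xs ih =>
    intro h
    rcases List.nodup_cons.mp h with ⟨hx, hxs⟩
    refine List.Nodup.append ?_ (ih hxs) ?_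
    · exact (List.nodup_map_iff (by intro a b hab; exact congrArg Prod.snd hab)).mpr hxs
    · intro p hp hp2
      rcases List.mem_map.mp hp with ⟨y, _, rfl⟩
      exact hx (mem_combos2 hp2).1

theorem swap_not_mem_combos2 {α : Type} [DecidableEq α] {q : α × α} :
    ∀ {l : List α}, l.Nodup → q ∈ combos2 l → (q.2, q.1) ∉ combos2 l := by
  intro l
  induction l with
  | nil => simp [combos2]
  | cons x xs ih =>
    intro h hq hs
    rcases List.nodup_cons.mp h with ⟨hx, hxs⟩
    simp only [combos2, List.mem_append, List.mem_map] at hq hs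
    rcases hq with ⟨y, hy, hqy⟩ | hq
    · cases hqy
      rcases hs with ⟨z, hz, hsz⟩ | hs
      · have h2 : x = y := by simpa using congrArg Prod.fst hsz
        exact hx (h2 ▸ hy)
      · exact hx (mem_combos2 hs).2
    · rcases hs with ⟨z, hz, hsz⟩ | hs
      · have h2 : x = q.2 := by simpa using congrArg Prod.fst hsz
        exact hx (h2 ▸ (mem_combos2 hq).2)
      · exact ih hxs hq hs
theorem contains_aStep (c : PySem.Dict (Int × Int) Int) (k r : Int × Int) :
    (aStep c k).contains r = c.contains r := by
  unfold aStep
  split_ifs with h1 h2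
  · rw [PySem.Dict.contains_insert]
    by_cases hr : r = k
    · subst hr; simp [h1]
    · simp [hr]
  · rw [PySem.Dict.contains_insert]
    by_cases hr : r = (k.2, k.1)
    · subst hr; simp [h2]
    · simp [hr]
  · rfl

theorem contains_aFold (L : List (Int × Int)) (c : PySem.Dict (Int × Int) Int) (r : Int × Int) :
    (L.foldl aStep c).contains r = c.contains r := by
  induction L generalizing c with
  | nil => rfl
  | cons k L ih => rw [List.foldl_cons, ih, contains_aStep]

theorem keys_aFold (L : List (Int × Int)) (c : PySem.Dict (Int × Int) Int) :
    (L.foldl aStep c).keys = c.keys := by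
  induction L generalizing c with
  | nil => rfl
  | cons k L ih =>
    obtain ⟨a, b⟩ := k
    rw [List.foldl_cons, ih]
    unfold aStep
    split_ifs with h1 h2
    · exact PySem.Dict.keys_insert_of_contains _ _ h1
    · exact PySem.Dict.keys_insert_of_contains _ _ h2
    · rfl

def aIncr (c : PySem.Dict (Int × Int) Int) (L : List (Int × Int)) (q : Int × Int) : Int :=
  if c.contains q then (L.count q : Int) + (if c.contains (q.2, q.1) then 0 else (L.count (q.2, q.1) : Int)) else 0

theorem getD_aStep (c : PySem.Dict (Int × Int) Int) (k q : Int × Int) :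
    (aStep c k).getD q 0 = c.getD q 0 + aIncr c [k] q := by
  unfold aStep aIncr
  by_cases h1 : c.contains k = true
  · rw [if_pos h1, PySem.Dict.getD_insert]
    by_cases hq : q = k
    · rw [if_pos hq]
      subst hq
      rw [if_pos h1]
      by_cases hs : c.contains (q.2, q.1) = true
      · rw [if_pos hs]
        simp [List.count_cons]
      · rw [if_neg hs]
        have hne : ¬ ((q : Int × Int) = (q.2, q.1)) := by
          intro h
          exact hs (by rw [← h]; exact h1)
        simp [hne]
    · rw [if_neg hq]
      by_cases hcq : c.contains q = true
      · rw [if_pos hcq]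
        have hkq : ¬ ((k : Int × Int) = q) := fun h => hq h.symm
        by_cases hs : c.contains (q.2, q.1) = true
        · rw [if_pos hs]; simp [hkq]
        · rw [if_neg hs]
          have h3 : ¬ ((k : Int × Int) = (q.2, q.1)) := by
            intro h
            exact hs (by rw [← h]; exact h1)
          simp [hkq, h3]
      · rw [if_neg hcq]; simp
  · rw [if_neg h1]
    by_cases h2 : c.contains (k.2, k.1) = true
    · rw [if_pos h2, PySem.Dict.getD_insert]
      by_cases hq : q = (k.2, k.1)
      · rw [if_pos hq]
        subst hq
        rw [if_pos h2]
        have hee : ((((k.2, k.1) : Int × Int).2, ((k.2, k.1) : Int × Int).1) : Int × Int) = k := by simp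
        rw [hee, if_neg h1]
        have hne : ¬ ((k : Int × Int) = (k.2, k.1)) := by
          intro h; exact h1 (by rw [h]; exact h2)
        simp [hne]
      · rw [if_neg hq]
        by_cases hcq : c.contains q = true
        · rw [if_pos hcq]
          have hkq : ¬ ((k : Int × Int) = q) := fun h => h1 (h ▸ hcq)
          by_cases hs : c.contains (q.2, q.1) = true
          · rw [if_pos hs]; simp [hkq]
          · rw [if_neg hs]
            have h3 : ¬ ((k : Int × Int) = (q.2, q.1)) := by
              intro h
              apply hq
              rw [h]
            simp [hkq, h3]
        · rw [if_neg hcq]; simp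
    · rw [if_neg h2]
      by_cases hcq : c.contains q = true
      · rw [if_pos hcq]
        have hkq : ¬ ((k : Int × Int) = q) := fun h => h1 (h ▸ hcq)
        by_cases hs : c.contains (q.2, q.1) = true
        · rw [if_pos hs]; simp [hkq]
        · rw [if_neg hs]
          have h3 : ¬ ((k : Int × Int) = (q.2, q.1)) := by
            intro h
            apply h2
            rw [h]
            simpa using hcq
          simp [hkq, h3]
      · rw [if_neg hcq]; simp

theorem aIncr_cons (c : PySem.Dict (Int × Int) Int) (k : Int × Int) (L : List (Int × Int)) (q : Int × Int) :
    aIncr c (k :: L) q = aIncr c [k] q + aIncr c L q := by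
  have hcons : (k :: L) = [k] ++ L := rfl
  rw [hcons]
  unfold aIncr
  split_ifs <;> push_cast [List.count_append] <;> ring

theorem aIncr_aStep (c : PySem.Dict (Int × Int) Int) (k : Int × Int) (L : List (Int × Int)) (q : Int × Int) :
    aIncr (aStep c k) L q = aIncr c L q := by
  unfold aIncr; rw [contains_aStep, contains_aStep]

theorem getD_aFold (L : List (Int × Int)) (c : PySem.Dict (Int × Int) Int) (q : Int × Int) :
    (L.foldl aStep c).getD q 0 = c.getD q 0 + aIncr c L q := by
  induction L generalizing c with
  | nil =>
    simp only [List.foldl_nil]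
    unfold aIncr
    split_ifs <;> simp
  | cons k L ih =>
    rw [List.foldl_cons, ih, aIncr_aStep, getD_aStep, aIncr_cons c k L q]
    ring

theorem aIncr_append (c : PySem.Dict (Int × Int) Int) (L1 L2 : List (Int × Int)) (q : Int × Int) :
    aIncr c (L1 ++ L2) q = aIncr c L1 q + aIncr c L2 q := by
  unfold aIncr
  split_ifs <;> push_cast [List.count_append] <;> ring

theorem keys_aOuter (rows : List (List Int)) (c : PySem.Dict (Int × Int) Int) :
    (rows.foldl (fun c row => (combos2 row).foldl aStep c) c).keys = c.keys := by
  induction rows generalizing c with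
  | nil => rfl
  | cons row rows ih => rw [List.foldl_cons, ih, keys_aFold]

theorem getD_aOuter (rows : List (List Int)) (c : PySem.Dict (Int × Int) Int) (q : Int × Int) :
    (rows.foldl (fun c row => (combos2 row).foldl aStep c) c).getD q 0
      = c.getD q 0 + aIncr c (rows.flatMap combos2) q := by
  induction rows generalizing c with
  | nil =>
    simp only [List.foldl_nil, List.flatMap_nil]
    unfold aIncr
    split_ifs <;> simp
  | cons row rows ih =>
    rw [List.foldl_cons, ih, getD_aFold, List.flatMap_cons, aIncr_append]
    have : aIncr ((combos2 row).foldl aStep c) (rows.flatMap combos2) q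
         = aIncr c (rows.flatMap combos2) q := by
      unfold aIncr; rw [contains_aFold, contains_aFold]
    rw [this]
    ring

theorem getD_init (L : List (Int × Int)) (d : PySem.Dict (Int × Int) Int) (q : Int × Int)
    (h : d.getD q 0 = 0) :
    (L.foldl (fun d k => d.insert k (0 : Int)) d).getD q 0 = 0 := by
  induction L generalizing d with
  | nil => simpa using h
  | cons k L ih =>
    rw [List.foldl_cons]
    apply ih
    rw [PySem.Dict.getD_insert]
    split_ifs <;> simp [h]

theorem getD_bOuter (rows : List (List Int)) (t : PySem.Dict (Int × Int) Int) (q : Int × Int) :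
    (rows.foldl (fun t row => (combos2 row).foldl bStep t) t).getD q 0
      = t.getD q 0 + ((rows.flatMap combos2).count q : Int) := by
  induction rows generalizing t with
  | nil => simp
  | cons row rows ih =>
    rw [List.foldl_cons, ih, List.flatMap_cons]
    unfold bStep
    rw [PySem.Dict.getD_foldl_insert_add_one]
    push_cast [List.count_append]
    ring

theorem Apiori2_spec : Claim_equal_Apiori2 := by
  intro data p1data support _
  unfold Spec_Apiori2 Apiori2 Apiori2_alt
  dsimp only
  set ks := (PySem.Dict.ofList p1data).keys with hks_def
  have hks : ks.Nodup := PySem.Dict.nodup_keys_ofList p1data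
  set combos := combos2 ks with hcombos_def
  have hnc : combos.Nodup := nodup_combos2 hks
  -- initial counter: keys = combos, all values 0
  set c0 := combos.foldl (fun d k => d.insert k (0 : Int)) PySem.Dict.empty with hc0_def
  have hkeys0 : c0.keys = combos := by
    rw [hc0_def, PySem.Dict.keys_foldl_insert]
    simp [PySem.Set.update_nil_left, PySem.Set.ofList_eq_self_of_nodup combos hnc]
  have hc0get : ∀ q : Int × Int, c0.getD q 0 = 0 := by
    intro q
    exact getD_init combos PySem.Dict.empty q (by simp)
  have hc0cont : ∀ q : Int × Int, c0.contains q = decide (q ∈ combos) := by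
    intro q
    rw [PySem.Dict.contains_eq_decide_mem_keys, hkeys0]
  -- final counter
  set cF := data.foldl (fun c row => (combos2 row).foldl aStep c) c0 with hcF_def
  have hkeysF : cF.keys = combos := by rw [hcF_def, keys_aOuter, hkeys0]
  have hnodF : cF.keys.Nodup := by rw [hkeysF]; exact hnc
  set flat := data.flatMap combos2 with hflat_def
  have hval : ∀ q ∈ combos, cF.getD q 0 = (flat.count q : Int) + (flat.count (q.2, q.1) : Int) := by
    intro q hq
    rw [hcF_def, getD_aOuter, hc0get]
    unfold aIncr
    rw [hc0cont, hc0cont]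
    have h1 : q ∈ combos := hq
    have h2 : (q.2, q.1) ∉ combos := swap_not_mem_combos2 hks hq
    simp [h1, h2, hflat_def]
  -- the tally of B
  set tly := data.foldl (fun t row => (combos2 row).foldl bStep t) PySem.Dict.empty with htly_def
  have htget : ∀ q : Int × Int, tly.getD q 0 = (flat.count q : Int) := by
    intro q
    rw [htly_def, getD_bOuter, ← hflat_def]
    simp
  -- rewrite A's item list
  have hitems : cF.items = combos.map (fun q => (q, cF.getD q 0)) :=
    PySem.Dict.items_eq_map_keys cF hnodF 0 ▸ by rw [hkeysF]
  rw [hitems, List.foldl_map]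
  apply PySem.List.foldl_congr_mem
  intro acc q hq
  dsimp only
  rw [hval q hq, htget q, htget (q.2, q.1)]
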